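-- pv_equiv track=rewrite | github.com/circuitdao/circuit-analytics | circuit_analytics/drivers/protocol_math.py | _pow_discount
-- ===== SOURCE A (Python) =====
-- PRECISION = 10**10
--
-- def _pow_discount(base: int, exp: int) -> int:
--     """Exponentiation-by-squaring in fixed point with per-multiplication truncation.
--
--     Mirrors pow-discount in utils.clib: returns PRECISION when exp == 0, and for each
--     multiplication applies integer division by PRECISION immediately to preserve the
--     same rounding behaviour as applying the factor minute-by-minute.
--     """
--     if exp == 0:
--         return PRECISION
--     squared = (base * base) // PRECISION
--     recur = _pow_discount(squared, exp // 2)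
--     if exp % 2 == 1:
--         return (recur * base) // PRECISION
--     return recur
-- ===== SOURCE B (Python) =====
-- PRECISION = 10**10
--
-- def _pow_discount(base: int, exp: int) -> int:
--     """Iterative exponentiation-by-squaring, MSB-to-LSB, same truncation order."""
--     if exp == 0:
--         return PRECISION
--     n = exp.bit_length()
--     sq = [base]
--     for _ in range(n - 1):
--         sq.append(sq[-1] * sq[-1] // PRECISION)
--     result = PRECISION
--     for k in reversed(range(n)):
--         if (exp >> k) & 1:
--             result = result * sq[k] // PRECISION
--     return result
-- ===== Notes on version B (the rewrite author's own statement) =====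
-- stated objective: alternative
-- what changed: Replaces A's recursive exponentiation-by-squaring with an iterative loop: precompute the repeated-squaring table once, then fold over the exponent's bits from most to least significant, preserving the per-multiply truncation order.
import Mathlib
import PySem

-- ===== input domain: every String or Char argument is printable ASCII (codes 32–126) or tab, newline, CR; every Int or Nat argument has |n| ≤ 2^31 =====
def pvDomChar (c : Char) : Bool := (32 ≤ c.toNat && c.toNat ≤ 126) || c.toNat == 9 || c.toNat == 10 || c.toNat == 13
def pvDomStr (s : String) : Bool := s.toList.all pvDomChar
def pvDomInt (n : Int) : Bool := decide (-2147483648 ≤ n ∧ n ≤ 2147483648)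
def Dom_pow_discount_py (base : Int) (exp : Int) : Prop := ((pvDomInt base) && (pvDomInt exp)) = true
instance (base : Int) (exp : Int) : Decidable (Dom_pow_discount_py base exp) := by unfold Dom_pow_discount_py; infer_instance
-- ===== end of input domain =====

-- B replaces A's recursion by an iterative MSB-to-LSB bit loop over a precomputed squaring table (same truncation order); objective: alternative.

def pvPRECISION : Int := 10 ^ 10

-- ===== PORT A =====
def pow_discount_py (base : Int) (exp : Int) : Int :=
  if exp = 0 then pvPRECISION
  else if exp < 0 then 0  -- Python recurses forever (RecursionError) here; totality guard only, outside Pre_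
  else
    let squared := PySem.Int.floordiv (base * base) pvPRECISION
    let recur := pow_discount_py squared (PySem.Int.floordiv exp 2)
    if PySem.Int.mod exp 2 = 1 then PySem.Int.floordiv (recur * base) pvPRECISION
    else recur
termination_by exp.toNat
decreasing_by
  rw [PySem.Int.floordiv_eq_ediv_of_pos (by omega : (0:Int) < 2)]
  omega

-- ===== PORT B =====
-- sq = [base]; for _ in range(n-1): sq.append(sq[-1]*sq[-1]//PRECISION)
def pvSqList (base : Int) : Nat → List Int
  | 0 => [base]
  | m + 1 =>
    let s := pvSqList base m
    s ++ [PySem.Int.floordiv (s.getLastD 0 * s.getLastD 0) pvPRECISION]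

def pow_discount_py_alt (base : Int) (exp : Int) : Int :=
  if exp = 0 then pvPRECISION
  else
    let n := PySem.Int.bitLength exp
    let sq := pvSqList base (n - 1)
    ((List.range n).reverse).foldl
      (fun result (k : Nat) =>
        if PySem.Int.band (exp >>> k) 1 = 1
        then PySem.Int.floordiv (result * sq.getD k 0) pvPRECISION
        else result)
      pvPRECISION

-- ===== PRECONDITION & SPEC =====
-- Pre_ excludes exp < 0, on which A recurses forever (RecursionError): A never returns there.
def Pre_pow_discount_py (base : Int) (exp : Int) : Prop := 0 ≤ exp
instance (base : Int) (exp : Int) : Decidable (Pre_pow_discount_py base exp) := by unfold Pre_pow_discount_py; infer_instance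
def pvWitness_pow_discount_py : Int × Int := (2000000000, 13)

def Spec_pow_discount_py (base : Int) (exp : Int) (out : Int) : Prop := out = pow_discount_py_alt base exp
instance (base : Int) (exp : Int) (out : Int) : Decidable (Spec_pow_discount_py base exp out) := by unfold Spec_pow_discount_py; infer_instance

-- ===== CLAIM (what is proved, stated in full; the proofs are below) =====
def Claim_equal_pow_discount_py : Prop := ∀ (base : Int) (exp : Int), Dom_pow_discount_py base exp → Pre_pow_discount_py base exp → Spec_pow_discount_py base exp (pow_discount_py base exp)

-- ===== LEMMAS AND PROOFS =====

-- the k-th element of the squaring table, as a plain recurrence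
def pvSqSeq (base : Int) : Nat → Int
  | 0 => base
  | k + 1 => PySem.Int.floordiv (pvSqSeq base k * pvSqSeq base k) pvPRECISION

-- the body of B's fold, named for the proofs
def pvStep (b e : Int) (result : Int) (k : Nat) : Int :=
  if PySem.Int.band (e >>> k) 1 = 1
  then PySem.Int.floordiv (result * (pvSqList b (PySem.Int.bitLength e - 1)).getD k 0) pvPRECISION
  else result

lemma pvSqList_length (base : Int) (m : Nat) : (pvSqList base m).length = m + 1 := by
  induction m with
  | zero => rfl
  | succ m ih => simp [pvSqList, ih]

lemma pvSqList_getLastD (base : Int) (m : Nat) : (pvSqList base m).getLastD 0 = pvSqSeq base m := by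
  induction m with
  | zero => rfl
  | succ m ih =>
    rw [pvSqList]
    show (pvSqList base m ++ [_]).getLastD 0 = _
    rw [List.getLastD_concat, ih, pvSqSeq]

lemma pvSqList_getD (base : Int) (m k : Nat) (hk : k ≤ m) :
    (pvSqList base m).getD k 0 = pvSqSeq base k := by
  induction m with
  | zero => interval_cases k; rfl
  | succ m ih =>
    rcases Nat.lt_or_ge k (m + 1) with h | h
    · have hlen : k < (pvSqList base m).length := by rw [pvSqList_length]; omega
      rw [pvSqList]
      show (pvSqList base m ++ [_]).getD k 0 = _
      rw [List.getD, List.getElem?_append_left hlen, ← List.getD, ih (by omega)]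
    · have hk' : k = m + 1 := by omega
      subst hk'
      rw [pvSqList]
      show (pvSqList base m ++ [_]).getD (m + 1) 0 = _
      rw [List.getD, List.getElem?_append_right (by rw [pvSqList_length]),
        pvSqList_length]
      simp only [Nat.sub_self, List.getElem?_cons_zero, Option.getD_some]
      rw [pvSqList_getLastD]
      rfl

lemma pvSqSeq_shift (base : Int) (k : Nat) :
    pvSqSeq base (k + 1) = pvSqSeq (PySem.Int.floordiv (base * base) pvPRECISION) k := by
  induction k with
  | zero => rfl
  | succ k ih => rw [pvSqSeq, ih, pvSqSeq]

lemma pvShift_half (e : Int) (k : Nat) (he : 0 ≤ e) :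
    PySem.Int.floordiv e 2 >>> k = e >>> (k + 1) := by
  rw [PySem.Int.floordiv_eq_ediv_of_pos (by omega : (0:Int) < 2)]
  obtain ⟨m, rfl⟩ := Int.eq_ofNat_of_zero_le he
  have h2 : (m : Int) / 2 = ((m / 2 : Nat) : Int) := by omega
  rw [h2, Int.shiftRight_eq_div_pow, Int.shiftRight_eq_div_pow]
  have ha : ((m / 2 : Nat) : Int) / ((2 ^ k : Nat) : Int) = ((m / 2 / 2 ^ k : Nat) : Int) := by
    exact_mod_cast (Int.natCast_ediv _ _)
  have hb : ((m : Nat) : Int) / ((2 ^ (k + 1) : Nat) : Int) = ((m / 2 ^ (k + 1) : Nat) : Int) := by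
    exact_mod_cast (Int.natCast_ediv _ _)
  rw [ha, hb, Nat.div_div_eq_div_mul, ← pow_succ']

-- B's value as a fold of pvStep over the bit indices, also valid at e = 0
lemma pvAlt_eq_fold (b e : Int) (h0 : e = 0 → PySem.Int.bitLength e = 0) :
    pow_discount_py_alt b e =
      ((List.range (PySem.Int.bitLength e)).reverse).foldl (pvStep b e) pvPRECISION := by
  by_cases he : e = 0
  · subst he
    rw [h0 rfl]
    rfl
  · simp only [pow_discount_py_alt, if_neg he]
    rfl

-- B's fold satisfies A's recurrence
lemma pvAlt_rec (b e : Int) (he : 0 < e) :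
    pow_discount_py_alt b e =
      (if PySem.Int.mod e 2 = 1
       then PySem.Int.floordiv
         (pow_discount_py_alt (PySem.Int.floordiv (b * b) pvPRECISION) (PySem.Int.floordiv e 2) * b)
         pvPRECISION
       else pow_discount_py_alt (PySem.Int.floordiv (b * b) pvPRECISION) (PySem.Int.floordiv e 2)) := by
  set sq := PySem.Int.floordiv (b * b) pvPRECISION with hsq
  set e' := PySem.Int.floordiv e 2 with he'
  have he2 : e' = e / 2 := PySem.Int.floordiv_eq_ediv_of_pos (by omega)
  have he'nonneg : 0 ≤ e' := by rw [he2]; omega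
  have hbl : PySem.Int.bitLength e = PySem.Int.bitLength e' + 1 :=
    PySem.Int.bitLength_of_pos he
  set n' := PySem.Int.bitLength e' with hn'
  have hbl0 : e' = 0 → n' = 0 := by intro h; rw [hn', h]; rfl
  have hn'pos : e' ≠ 0 → 1 ≤ n' := by
    intro h
    have : 0 < e' := by omega
    rw [hn', PySem.Int.bitLength_of_pos this]; omega
  rw [pvAlt_eq_fold b e (by intro h; omega), pvAlt_eq_fold sq e' hbl0, hbl, ← hn']
  rw [List.range_succ_eq_map, List.reverse_cons, ← List.map_reverse, List.foldl_append,
    List.foldl_cons, List.foldl_nil, List.foldl_map]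
  have hcongr :
      (List.range n').reverse.foldl (fun acc k => pvStep b e acc (Nat.succ k)) pvPRECISION =
      (List.range n').reverse.foldl (pvStep sq e') pvPRECISION := by
    apply PySem.List.foldl_congr_mem
    intro acc k hk
    have hklt : k < n' := by
      rw [List.mem_reverse, List.mem_range] at hk
      exact hk
    have hne' : e' ≠ 0 := by
      intro h
      rw [hbl0 h] at hklt
      omega
    have h1 := hn'pos hne'
    simp only [Nat.succ_eq_add_one]
    unfold pvStep
    rw [← pvShift_half e k (by omega), ← he', hbl, Nat.add_sub_cancel,
      pvSqList_getD b n' (k + 1) (by omega), pvSqSeq_shift, ← hsq, ← hn',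
      ← pvSqList_getD sq (n' - 1) k (by omega)]
  rw [hcongr]
  unfold pvStep
  have hsh0 : e >>> (0 : Nat) = e := by
    rw [Int.shiftRight_eq_div_pow]; simp
  rw [hsh0, PySem.Int.band_one, hbl, Nat.add_sub_cancel,
    pvSqList_getD b n' 0 (by omega)]
  rfl

lemma pvAeqB (N : Nat) : ∀ (b e : Int), 0 ≤ e → e.toNat ≤ N →
    pow_discount_py b e = pow_discount_py_alt b e := by
  induction N with
  | zero =>
    intro b e he hN
    have h0 : e = 0 := by omega
    subst h0
    rw [pow_discount_py, pow_discount_py_alt]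
    rfl
  | succ N ih =>
    intro b e he hN
    by_cases h0 : e = 0
    · subst h0
      rw [pow_discount_py, pow_discount_py_alt]
      rfl
    · have hpos : 0 < e := by omega
      rw [pow_discount_py, if_neg h0, if_neg (by omega), pvAlt_rec b e hpos]
      have he2 : PySem.Int.floordiv e 2 = e / 2 :=
        PySem.Int.floordiv_eq_ediv_of_pos (by omega)
      have := ih (PySem.Int.floordiv (b * b) pvPRECISION) (PySem.Int.floordiv e 2)
        (by rw [he2]; omega) (by rw [he2]; omega)
      simp only [this]

-- ===== VERDICT (by name: the statement is the Claim_ definition above) =====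
theorem pow_discount_py_spec : Claim_equal_pow_discount_py := by
  intro base exp _ hpre
  unfold Spec_pow_discount_py
  exact pvAeqB exp.toNat base exp hpre le_rfl
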